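-- pv_equiv track=rewrite | github.com/TessFerrandez/AdventOfCode-Python | 2020/day18.py | get_inner_parenthesis_content
-- ===== SOURCE A (Python) =====
-- def get_inner_parenthesis_content(expression: str) -> str:
--     """
--     returns the innermost parenthesis - e.g. ((5 + 2 + (3 * 2)) + (2 + 3))
--     would return (3 * 2)
--     -- note, other lower may exist later in the string but this is the first
--     -- occurring leaf node
--     :param expression: string with math equation
--     :return: contents of lowest level parenthesis
--     """
--     stack = []
--     for i, c in enumerate(expression):
--         if c == '(':
--             stack.append(i)
--         elif c == ')' and stack:
--             start = stack.pop()
--             return expression[start + 1: i]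
--     return ''
-- ===== SOURCE B (Python) =====
-- def get_inner_parenthesis_content(expression: str) -> str:
--     """One forward pass keeping a running content buffer instead of a stack of
--     indices: every '(' starts (or restarts) the buffer, the first ')' seen after
--     a '(' returns it; no indices or slicing needed."""
--     started = False
--     content = ''
--     for c in expression:
--         if c == '(':
--             started = True
--             content = ''
--         elif c == ')' and started:
--             return content
--         elif started:
--             content += c
--     return ''
-- ===== Notes on version B (the rewrite author's own statement) =====
-- stated objective: simpler
-- what changed: Replaces the stack of '(' indices plus slicing of the original string by a single flag and a running content buffer that is reset at every '(' and returned at the first matching ')'.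
import Mathlib
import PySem

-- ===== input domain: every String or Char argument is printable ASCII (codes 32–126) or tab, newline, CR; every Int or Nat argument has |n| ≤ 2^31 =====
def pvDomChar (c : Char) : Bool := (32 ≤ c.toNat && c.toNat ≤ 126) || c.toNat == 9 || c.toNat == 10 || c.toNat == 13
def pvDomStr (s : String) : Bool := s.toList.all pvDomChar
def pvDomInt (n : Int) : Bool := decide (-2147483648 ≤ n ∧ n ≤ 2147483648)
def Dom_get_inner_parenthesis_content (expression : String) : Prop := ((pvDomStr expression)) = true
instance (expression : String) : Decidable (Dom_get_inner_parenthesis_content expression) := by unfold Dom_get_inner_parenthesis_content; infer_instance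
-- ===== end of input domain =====

-- B replaces A's stack of '(' indices + slicing by a flag and a running content buffer (simpler; same O(n) cost).

-- ===== PORT A =====
-- the enumerate loop: stack of '(' indices (head = Python list's end), early return slices the original string
def pvGoA (full : List Char) : List (Int × Char) → List Int → String
  | [], _ => ""
  | (i, c) :: rest, stack =>
    if c = '(' then pvGoA full rest (i :: stack)
    else if c = ')' then
      match stack with
      | start :: _ => String.ofList (PySem.List.slice full (some (start + 1)) (some i))
      | [] => pvGoA full rest []
    else pvGoA full rest stack

def get_inner_parenthesis_content (expression : String) : String :=
  pvGoA expression.toList (PySem.List.enumerate expression.toList 0) []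

-- ===== PORT B =====
-- single pass: '(' resets the buffer, first ')' after a '(' returns it
def pvGoB : List Char → Bool → List Char → String
  | [], _, _ => ""
  | c :: rest, started, content =>
    if c = '(' then pvGoB rest true []
    else if c = ')' ∧ started = true then String.ofList content
    else if started = true then pvGoB rest started (content ++ [c])
    else pvGoB rest started content

def get_inner_parenthesis_content_alt (expression : String) : String :=
  pvGoB expression.toList false []

-- ===== PRECONDITION & SPEC =====
def Spec_get_inner_parenthesis_content (expression : String) (out : String) : Prop := out = get_inner_parenthesis_content_alt expression
instance (expression : String) (out : String) : Decidable (Spec_get_inner_parenthesis_content expression out) := by unfold Spec_get_inner_parenthesis_content; infer_instance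

-- ===== CLAIM (what is proved, stated in full; the proofs are below) =====
def Claim_equal_get_inner_parenthesis_content : Prop := ∀ (expression : String), Dom_get_inner_parenthesis_content expression → Spec_get_inner_parenthesis_content expression (get_inner_parenthesis_content expression)

-- ===== LEMMAS AND PROOFS =====

-- loop invariant: stack nonempty iff started, and then B's buffer is exactly the slice A would cut
lemma pv_main (full : List Char) : ∀ (suf : List Char) (k : Nat) (stack : List Int)
    (started : Bool) (content : List Char),
    suf = full.drop k →
    ((stack = [] ∧ started = false) ∨
      (∃ tn : Nat, ∃ tl, stack = ((tn : Int) :: tl) ∧ started = true ∧ tn < k ∧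
        content = (full.drop (tn + 1)).take (k - tn - 1))) →
    pvGoA full (PySem.List.enumerate suf (k : Int)) stack = pvGoB suf started content := by
  intro suf
  induction suf with
  | nil =>
    intro k stack started content _ _
    simp [PySem.List.enumerate_nil, pvGoA, pvGoB]
  | cons c rest ih =>
    intro k stack started content hsuf hinv
    have hrest : rest = full.drop (k + 1) := by
      have ht : (full.drop k).tail = rest := by rw [← hsuf]; rfl
      rw [List.tail_drop] at ht
      exact ht.symm
    have hck : full[k]? = some c := by
      have h0 : (full.drop k)[0]? = some c := by rw [← hsuf]; rfl
      simpa [List.getElem?_drop] using h0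
    have hcast : (k : Int) + 1 = ((k + 1 : Nat) : Int) := by push_cast; ring
    rw [PySem.List.enumerate_cons]
    simp only [pvGoA, pvGoB]
    by_cases hc : c = '('
    · rw [if_pos hc, if_pos hc, hcast]
      apply ih (k + 1) _ true [] hrest
      exact Or.inr ⟨k, stack, rfl, rfl, by omega, by simp⟩
    · rw [if_neg hc, if_neg hc]
      by_cases hcr : c = ')'
      · rcases hinv with ⟨hs, hb⟩ | ⟨tn, tl, hs, hb, hlt, hcontent⟩
        · subst hs; subst hb
          rw [if_pos hcr, if_neg (by simp : ¬(c = ')' ∧ false = true)),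
            if_neg (by simp : ¬(false = true)), hcast]
          exact ih (k + 1) [] false content hrest (Or.inl ⟨rfl, rfl⟩)
        · subst hs; subst hb
          rw [if_pos hcr, if_pos ⟨hcr, rfl⟩]
          show String.ofList (PySem.List.slice full (some ((tn : Int) + 1)) (some (k : Int)))
              = String.ofList content
          have htn : ((tn : Int)) + 1 = ((tn + 1 : Nat) : Int) := by push_cast; ring
          rw [htn, PySem.List.slice_natCast, hcontent]
          congr 2
      · rw [if_neg hcr, if_neg (fun h => hcr h.1)]
        rcases hinv with ⟨hs, hb⟩ | ⟨tn, tl, hs, hb, hlt, hcontent⟩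
        · subst hs; subst hb
          rw [if_neg (by simp : ¬(false = true)), hcast]
          exact ih (k + 1) [] false content hrest (Or.inl ⟨rfl, rfl⟩)
        · subst hs; subst hb
          rw [if_pos rfl, hcast]
          apply ih (k + 1) _ true (content ++ [c]) hrest
          refine Or.inr ⟨tn, tl, rfl, rfl, by omega, ?_⟩
          have hidx : (full.drop (tn + 1))[k - tn - 1]? = some c := by
            rw [List.getElem?_drop, show tn + 1 + (k - tn - 1) = k by omega]
            exact hck
          rw [hcontent, show k + 1 - tn - 1 = (k - tn - 1) + 1 by omega, List.take_add_one, hidx]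
          simp

-- ===== VERDICT (by name: the statement is the Claim_ definition above) =====
theorem get_inner_parenthesis_content_spec : Claim_equal_get_inner_parenthesis_content := by
  intro expression _
  unfold Spec_get_inner_parenthesis_content get_inner_parenthesis_content get_inner_parenthesis_content_alt
  exact (pv_main expression.toList expression.toList 0 [] false [] (by simp) (Or.inl ⟨rfl, rfl⟩))
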